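-- pv_equiv track=rewrite | github.com/LHNCBC/pymetamaplite | src/nls_strings/__init__.py | eliminate_nos_expansion
-- ===== SOURCE A (Python) =====
-- nos_expansion_string = [
--     ", not otherwise specified",
--     "; not otherwise specified",
--     ", but not otherwise specified",
--     " but not otherwise specified",
--     " not otherwise specified",
--     ", not elsewhere specified",
--     "; not elsewhere specified",
--     " not elsewhere specified",
--     "not elsewhere specified"
-- ]
--
-- def eliminate_nos_expansion(astring):
--     """ Eliminate any expansions of NOS """
--
--     lcString = astring.lower()
--     for expansion in nos_expansion_string:
--         charindex = lcString.find(expansion)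
--         if charindex == 0:
--             return eliminate_nos_expansion(lcString[len(expansion):])
--         elif charindex > 0:
--             return eliminate_nos_expansion(lcString[0:charindex] +
--                                            lcString[charindex +
--                                                     len(expansion):])
--     return astring
-- ===== SOURCE B (Python) =====
-- nos_expansion_string = [
--     ", not otherwise specified",
--     "; not otherwise specified",
--     ", but not otherwise specified",
--     " but not otherwise specified",
--     " not otherwise specified",
--     ", not elsewhere specified",
--     "; not elsewhere specified",
--     " not elsewhere specified",
--     "not elsewhere specified"
-- ]
--
--
-- def eliminate_nos_expansion(astring):
--     """Iterative version: lowercase once, repeatedly splice out the first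
--     expansion present (in list-priority order) until none remains; return
--     the original string untouched if nothing ever matched."""
--     lc = astring.lower()
--     found = False
--     while True:
--         hit = next((e for e in nos_expansion_string if e in lc), None)
--         if hit is None:
--             return lc if found else astring
--         i = lc.find(hit)
--         lc = lc[:i] + lc[i + len(hit):]
--         found = True
-- ===== Notes on version B (the rewrite author's own statement) =====
-- stated objective: simpler
-- what changed: A's recursion (which re-lowercases the string and rescans on every call, with separate index-0 and index>0 branches) is replaced by a flat iterative loop that lowercases once, repeatedly splices out the first expansion present in list-priority order, and returns the original string via a found flag when nothing matched.
import Mathlib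
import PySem

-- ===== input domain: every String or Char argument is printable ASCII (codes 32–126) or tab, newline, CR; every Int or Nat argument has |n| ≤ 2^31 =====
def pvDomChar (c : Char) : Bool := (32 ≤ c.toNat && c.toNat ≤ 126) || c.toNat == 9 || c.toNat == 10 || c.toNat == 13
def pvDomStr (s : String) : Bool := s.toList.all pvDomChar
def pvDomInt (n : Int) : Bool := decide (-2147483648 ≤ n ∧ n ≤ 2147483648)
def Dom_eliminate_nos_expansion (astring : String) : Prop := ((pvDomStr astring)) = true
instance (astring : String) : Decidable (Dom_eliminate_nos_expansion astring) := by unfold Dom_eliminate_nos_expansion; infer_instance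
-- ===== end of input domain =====

-- B rewrites A's recursion (which re-lowercases on every call) as a single iterative
-- splice loop over the lowercased string with a 'found' flag; same value everywhere.

def pvNosExpansion : List (List Char) :=
  [", not otherwise specified".toList,
   "; not otherwise specified".toList,
   ", but not otherwise specified".toList,
   " but not otherwise specified".toList,
   " not otherwise specified".toList,
   ", not elsewhere specified".toList,
   "; not elsewhere specified".toList,
   " not elsewhere specified".toList,
   "not elsewhere specified".toList]

-- ===== PORT A =====
-- the for-loop of A: the first expansion found in lc yields the next (spliced) string
def pvFindNos (lc : List Char) : List (List Char) → Option (List Char)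
  | [] => none
  | e :: rest =>
    let charindex := PySem.Chars.find lc e
    if charindex = 0 then
      some (PySem.Chars.slice lc (some (e.length : Int)) none)
    else if charindex > 0 then
      some (PySem.Chars.slice lc none (some charindex) ++
            PySem.Chars.slice lc (some (charindex + e.length)) none)
    else pvFindNos lc rest

-- A's recursion, with a fuel argument for totality only: each removal strictly
-- shortens the string, so fuel s.length+1 is never exhausted (proved below)
def pvElimAF : Nat → List Char → List Char
  | 0, s => s
  | fuel + 1, s =>
    match pvFindNos (PySem.Chars.lower s) pvNosExpansion with
    | some next => pvElimAF fuel next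
    | none => s

def eliminate_nos_expansion (astring : String) : String :=
  String.ofList (pvElimAF (astring.toList.length + 1) astring.toList)

-- ===== PORT B =====
-- the while-loop of B (fuel as above): orig is kept for the not-found return,
-- found records whether any expansion was ever removed
def pvElimBGoF : Nat → List Char → List Char → Bool → List Char
  | 0, orig, lc, found => if found then lc else orig
  | fuel + 1, orig, lc, found =>
    match pvNosExpansion.find? (fun e => PySem.Chars.isIn e lc) with
    | none => if found then lc else orig
    | some hit =>
      let i := PySem.Chars.find lc hit
      pvElimBGoF fuel orig
        (PySem.Chars.slice lc none (some i) ++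
         PySem.Chars.slice lc (some (i + hit.length)) none) true

def eliminate_nos_expansion_alt (astring : String) : String :=
  let lc := PySem.Chars.lower astring.toList
  String.ofList (pvElimBGoF (lc.length + 1) astring.toList lc false)

-- ===== PRECONDITION & SPEC =====
def Spec_eliminate_nos_expansion (astring : String) (out : String) : Prop := out = eliminate_nos_expansion_alt astring
instance (astring : String) (out : String) : Decidable (Spec_eliminate_nos_expansion astring out) := by unfold Spec_eliminate_nos_expansion; infer_instance

-- ===== CLAIM (what is proved, stated in full; the proofs are below) =====
def Claim_equal_eliminate_nos_expansion : Prop := ∀ (astring : String), Dom_eliminate_nos_expansion astring → Spec_eliminate_nos_expansion astring (eliminate_nos_expansion astring)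

-- ===== LEMMAS AND PROOFS =====

theorem pvNosExpansion_ne : ∀ e ∈ pvNosExpansion, e ≠ [] := by decide

-- the spliced string at the first occurrence of e in lc (proof abbreviation)
def pvSplice (lc e : List Char) : List Char :=
  PySem.Chars.slice lc none (some (PySem.Chars.find lc e)) ++
  PySem.Chars.slice lc (some (PySem.Chars.find lc e + e.length)) none

-- splicing out a nonempty occurring pattern strictly shortens the string
theorem pvSpliceLen (lc e : List Char) (he : e ≠ [])
    (h0 : 0 ≤ PySem.Chars.find lc e) :
    (pvSplice lc e).length < lc.length := by
  have hspec := (PySem.Chars.find_spec h0).1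
  have hle : e.length ≤ lc.length - (PySem.Chars.find lc e).toNat := by
    have := hspec.length_le
    simpa using this
  have hilen : PySem.Chars.find lc e ≤ (lc.length : Int) := PySem.Chars.find_le_length lc e
  have hpos : 0 < e.length := List.length_pos_iff.mpr he
  unfold pvSplice
  rw [PySem.Chars.slice_eq_listSlice, PySem.Chars.slice_eq_listSlice,
      PySem.List.slice_to lc h0, PySem.List.slice_from lc (by positivity)]
  have htn : ((PySem.Chars.find lc e + (e.length : Int))).toNat
      = (PySem.Chars.find lc e).toNat + e.length := by omega
  simp only [List.length_append, List.length_take, List.length_drop, htn]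
  omega

-- A's for loop finds exactly the first expansion contained in lc and splices it out
theorem pvFindNos_eq (es : List (List Char)) (lc : List Char) :
    pvFindNos lc es = (es.find? (fun e => PySem.Chars.isIn e lc)).map (pvSplice lc) := by
  induction es with
  | nil => simp [pvFindNos]
  | cons e rest ih =>
    simp only [pvFindNos, List.find?_cons]
    by_cases h0 : PySem.Chars.find lc e = 0
    · have hin : PySem.Chars.isIn e lc = true :=
        (PySem.Chars.isIn_iff_infix e lc).mpr
          ((PySem.Chars.find_nonneg_iff lc e).mp (by omega))
      simp only [h0, hin, Option.map_some, pvSplice, if_true]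
      rw [PySem.Chars.slice_eq_listSlice lc none (some 0),
          PySem.List.slice_to lc (le_refl (0 : Int))]
      simp [PySem.Chars.slice_eq_listSlice]
    · by_cases hpos : PySem.Chars.find lc e > 0
      · have hin : PySem.Chars.isIn e lc = true :=
          (PySem.Chars.isIn_iff_infix e lc).mpr
            ((PySem.Chars.find_nonneg_iff lc e).mp (by omega))
        simp [h0, hpos, hin, pvSplice]
      · have hneg : ¬ 0 ≤ PySem.Chars.find lc e := by omega
        have hin : PySem.Chars.isIn e lc = false := by
          by_contra hc
          exact hneg ((PySem.Chars.find_nonneg_iff lc e).mpr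
            ((PySem.Chars.isIn_iff_infix e lc).mp (by simpa using hc)))
        simp [h0, hpos, hin, ih]

theorem pvMapSlice {α β : Type} (f : α → β) (xs : List α) (a? b? : Option Int) :
    (PySem.List.slice xs a? b?).map f = PySem.List.slice (xs.map f) a? b? := by
  cases a? <;> cases b? <;>
    simp [PySem.List.slice, List.map_take, List.map_drop]

theorem pvLowerChar_idem (c : Char) :
    PySem.Chars.lowerChar (PySem.Chars.lowerChar c) = PySem.Chars.lowerChar c := by
  unfold PySem.Chars.lowerChar PySem.Chars.isupper
  by_cases h : 'A' ≤ c ∧ c ≤ 'Z'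
  · have h1 : 65 ≤ c.toNat ∧ c.toNat ≤ 90 := by
      obtain ⟨ha, hb⟩ := h
      rw [Char.le_def, UInt32.le_iff_toNat_le] at ha hb
      exact ⟨ha, hb⟩
    have hval : (Char.ofNat (c.toNat + 32)).toNat = c.toNat + 32 := by
      rw [Char.toNat_ofNat, if_pos]
      left; omega
    have hnot : ¬ ('A' ≤ Char.ofNat (c.toNat + 32) ∧ Char.ofNat (c.toNat + 32) ≤ 'Z') := by
      intro ⟨_, hb⟩
      rw [Char.le_def, UInt32.le_iff_toNat_le] at hb
      have : (Char.ofNat (c.toNat + 32)).toNat ≤ 90 := hb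
      omega
    simp only [decide_eq_true_eq, Bool.and_eq_true] at *
    rcases h with ⟨ha, hb⟩
    simp [ha, hb]
    intro h1' h2'
    exact absurd ⟨h1', h2'⟩ hnot
  · simp only [decide_eq_true_eq, Bool.and_eq_true] at *
    rcases Decidable.not_and_iff_not_or_not.mp h with h' | h' <;> simp [h']

theorem pvLower_idem (s : List Char) :
    PySem.Chars.lower (PySem.Chars.lower s) = PySem.Chars.lower s := by
  simp [PySem.Chars.lower, List.map_map, Function.comp_def, pvLowerChar_idem]

theorem pvLower_splice {lc : List Char} (h : PySem.Chars.lower lc = lc) (e : List Char) :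
    PySem.Chars.lower (pvSplice lc e) = pvSplice lc e := by
  unfold pvSplice
  simp only [PySem.Chars.lower, List.map_append, PySem.Chars.slice_eq_listSlice, pvMapSlice]
  have hmap : lc.map PySem.Chars.lowerChar = lc := h
  rw [hmap]

-- with enough fuel and an already-lowercased string, B's loop with found = true
-- computes exactly A's recursion
theorem pvKeyB : ∀ (fuel : Nat) (lc : List Char), lc.length < fuel →
    PySem.Chars.lower lc = lc → ∀ orig, pvElimBGoF fuel orig lc true = pvElimAF fuel lc := by
  intro fuel
  induction fuel with
  | zero => intro lc h; omega
  | succ fuel ih =>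
    intro lc hlen hlow orig
    simp only [pvElimBGoF, pvElimAF, pvFindNos_eq, hlow]
    cases hf : pvNosExpansion.find? (fun e => PySem.Chars.isIn e lc) with
    | none => simp
    | some e =>
      simp only [Option.map_some]
      have hin := List.find?_some hf
      have h0 : 0 ≤ PySem.Chars.find lc e :=
        (PySem.Chars.find_nonneg_iff lc e).mpr ((PySem.Chars.isIn_iff_infix e lc).mp hin)
      have hlt : (pvSplice lc e).length < lc.length :=
        pvSpliceLen lc e (pvNosExpansion_ne e (List.mem_of_find?_eq_some hf)) h0
      exact ih (pvSplice lc e) (by omega) (pvLower_splice hlow e) orig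

theorem pvElim_eq : ∀ (fuel : Nat) (s : List Char), s.length < fuel →
    pvElimAF fuel s = pvElimBGoF fuel s (PySem.Chars.lower s) false := by
  intro fuel
  induction fuel with
  | zero => intro s h; omega
  | succ fuel _ =>
    intro s hlen
    simp only [pvElimBGoF, pvElimAF, pvFindNos_eq]
    cases hf : pvNosExpansion.find? (fun e => PySem.Chars.isIn e (PySem.Chars.lower s)) with
    | none => simp
    | some e =>
      simp only [Option.map_some]
      have hin := List.find?_some hf
      have h0 : 0 ≤ PySem.Chars.find (PySem.Chars.lower s) e :=
        (PySem.Chars.find_nonneg_iff _ e).mpr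
          ((PySem.Chars.isIn_iff_infix e _).mp hin)
      have hlt : (pvSplice (PySem.Chars.lower s) e).length < (PySem.Chars.lower s).length :=
        pvSpliceLen _ e (pvNosExpansion_ne e (List.mem_of_find?_eq_some hf)) h0
      have hlens : (PySem.Chars.lower s).length = s.length := by
        simp [PySem.Chars.lower]
      exact (pvKeyB fuel (pvSplice (PySem.Chars.lower s) e) (by omega)
        (pvLower_splice (pvLower_idem s) e) s).symm

-- ===== VERDICT (by name: the statement is the Claim_ definition above) =====
theorem eliminate_nos_expansion_spec : Claim_equal_eliminate_nos_expansion := by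
  intro astring _
  unfold Spec_eliminate_nos_expansion eliminate_nos_expansion eliminate_nos_expansion_alt
  show String.ofList (pvElimAF (astring.toList.length + 1) astring.toList) =
    String.ofList (pvElimBGoF ((PySem.Chars.lower astring.toList).length + 1)
      astring.toList (PySem.Chars.lower astring.toList) false)
  have hlens : (PySem.Chars.lower astring.toList).length = astring.toList.length := by
    simp [PySem.Chars.lower]
  rw [hlens, pvElim_eq (astring.toList.length + 1) astring.toList (by omega)]
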